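-- pv_equiv track=rewrite | github.com/Deven-14/leetcode | 1937. Maximum Number of Points with Cost/solution.py | cal_left_max
-- ===== SOURCE A (Python) =====
-- def cal_left_max(dp):
--     left_max = []
--     max_idx = 0
--     left_max.append(dp[0])
--
--     for i in range(1, len(dp)):
--         t = dp[max_idx] - (i - max_idx)
--         if dp[i] >= t:
--             max_idx = i
--             left_max.append(dp[i])
--         else:
--             left_max.append(t)
--
--     return left_max
-- ===== SOURCE B (Python) =====
-- def cal_left_max(dp):
--     shifted = [x + i for i, x in enumerate(dp)]
--     best = shifted[0]
--     pms = []
--     for x in shifted: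
--         best = max(best, x)
--         pms.append(best)
--     return [m - i for i, m in enumerate(pms)]
-- ===== Notes on version B (the rewrite author's own statement) =====
-- stated objective: alternative
-- what changed: B reduces the problem to a plain prefix maximum via the reindexing identity left_max[i] = max_{j<=i}(dp[j]+j) - i: three staged passes (shift each value by its index, running prefix max, unshift by index) replace A's single indexed pass with max_idx tracking and decay arithmetic.
import Mathlib
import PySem

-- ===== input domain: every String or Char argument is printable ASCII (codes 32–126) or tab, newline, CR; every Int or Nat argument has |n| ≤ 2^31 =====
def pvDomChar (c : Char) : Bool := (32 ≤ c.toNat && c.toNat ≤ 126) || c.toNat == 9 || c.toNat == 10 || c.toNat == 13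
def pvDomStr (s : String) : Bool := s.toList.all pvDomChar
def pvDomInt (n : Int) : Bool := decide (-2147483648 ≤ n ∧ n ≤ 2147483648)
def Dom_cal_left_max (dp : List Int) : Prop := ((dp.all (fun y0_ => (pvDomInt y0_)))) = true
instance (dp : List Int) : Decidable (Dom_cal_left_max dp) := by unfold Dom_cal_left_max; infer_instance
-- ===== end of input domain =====

-- B computes left_max via the identity left_max[i] = max_{j<=i}(dp[j]+j) - i: shift / prefix-max / unshift passes instead of A's max_idx-tracking decay pass (alternative decomposition, same O(n)).


-- ===== PORT A =====
-- loop body of A: t = dp[max_idx] - (i - max_idx); branch on dp[i] >= t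
def calStepA (dp : List Int) (st : List Int × Int) (i : Int) : List Int × Int :=
  let t := PySem.List.pyGetD dp st.2 0 - (i - st.2)
  if PySem.List.pyGetD dp i 0 ≥ t then (st.1 ++ [PySem.List.pyGetD dp i 0], i)
  else (st.1 ++ [t], st.2)

def cal_left_max (dp : List Int) : List Int :=
  match dp with
  | [] => []   -- the first-element access dp[0] raises IndexError; excluded by Pre_cal_left_max
  | d0 :: _ =>
    ((PySem.List.pyRange 1 (dp.length : Int) 1).foldl (calStepA dp) ([d0], 0)).1

-- ===== PORT B =====
-- loop body of B: best = max(best, x); pms.append(best)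
def pmStep (st : List Int × Int) (x : Int) : List Int × Int :=
  (st.1 ++ [max st.2 x], max st.2 x)

def cal_left_max_alt (dp : List Int) : List Int :=
  let shifted := (PySem.List.enumerate dp 0).map (fun p => p.2 + p.1)
  match shifted with
  | [] => []   -- the access shifted[0] raises IndexError on empty dp; excluded by Pre_cal_left_max
  | s0 :: _ =>
    let pms := (shifted.foldl pmStep ([], s0)).1
    (PySem.List.enumerate pms 0).map (fun p => p.2 - p.1)

-- ===== PRECONDITION & SPEC =====
-- Pre_ excludes only the empty list, on which A (and B) raise IndexError at their initial first-element access.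
def Pre_cal_left_max (dp : List Int) : Prop := dp ≠ []
instance (dp : List Int) : Decidable (Pre_cal_left_max dp) := by unfold Pre_cal_left_max; infer_instance
def pvWitness_cal_left_max : List Int := ([3, 1, 2])

def Spec_cal_left_max (dp : List Int) (out : List Int) : Prop := out = cal_left_max_alt dp
instance (dp : List Int) (out : List Int) : Decidable (Spec_cal_left_max dp out) := by unfold Spec_cal_left_max; infer_instance

-- ===== CLAIM (what is proved, stated in full; the proofs are below) =====
def Claim_equal_cal_left_max : Prop := ∀ (dp : List Int), Dom_cal_left_max dp → Pre_cal_left_max dp → Spec_cal_left_max dp (cal_left_max dp)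

-- ===== LEMMAS AND PROOFS =====

-- invariant: after j iterations, with S the index-shifted list dp[k]+k,
-- A's accumulator equals the unshift of B's prefix-max accumulator so far,
-- A's max_idx m satisfies 0 ≤ m ≤ j, B's list has length j+1, and B's running
-- best equals dp[m] + m.
theorem cal_invariant (d0 : Int) (rest : List Int) (j : Nat) (hj : j ≤ rest.length) :
    (((PySem.List.pyRange 1 (1 + (j : Int)) 1).foldl (calStepA (d0 :: rest)) ([d0], 0)).1
      = (PySem.List.enumerate
          (((((PySem.List.enumerate (d0 :: rest) 0).map (fun p => p.2 + p.1)).take (j+1)).foldl pmStep ([], d0 + 0)).1) 0).map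
          (fun p => p.2 - p.1))
    ∧ (0 ≤ ((PySem.List.pyRange 1 (1 + (j : Int)) 1).foldl (calStepA (d0 :: rest)) ([d0], 0)).2)
    ∧ (((PySem.List.pyRange 1 (1 + (j : Int)) 1).foldl (calStepA (d0 :: rest)) ([d0], 0)).2 ≤ (j : Int))
    ∧ (((((PySem.List.enumerate (d0 :: rest) 0).map (fun p => p.2 + p.1)).take (j+1)).foldl pmStep ([], d0 + 0)).1.length = j + 1)
    ∧ (((((PySem.List.enumerate (d0 :: rest) 0).map (fun p => p.2 + p.1)).take (j+1)).foldl pmStep ([], d0 + 0)).2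
        = PySem.List.pyGetD (d0 :: rest)
            (((PySem.List.pyRange 1 (1 + (j : Int)) 1).foldl (calStepA (d0 :: rest)) ([d0], 0)).2) 0
          + ((PySem.List.pyRange 1 (1 + (j : Int)) 1).foldl (calStepA (d0 :: rest)) ([d0], 0)).2) := by
  induction j with
  | zero =>
    simp [PySem.List.pyRange_one_eq_nil, PySem.List.enumerate_cons, pmStep, PySem.List.pyGetD,
      PySem.List.enumerate_nil]
  | succ j ih =>
    have hj' : j ≤ rest.length := Nat.le_of_succ_le hj
    obtain ⟨h1, h2, h3, h4, h5⟩ := ih hj'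
    have hjlt : j < rest.length := hj
    set S := ((PySem.List.enumerate (d0 :: rest) 0).map (fun p => p.2 + p.1)) with hS
    have hSlen : S.length = rest.length + 1 := by
      simp [hS, PySem.List.length_enumerate]
    have hSget : S[j+1]'(by omega) = rest[j] + ((j : Int) + 1) := by
      simp [hS, PySem.List.getElem_enumerate]
      ring
    have hsplit : PySem.List.pyRange 1 (1 + ((j+1 : Nat) : Int)) 1
        = PySem.List.pyRange 1 (1 + (j : Int)) 1 ++ [1 + (j : Int)] := by
      have := PySem.List.pyRange_one_succ_right (a := 1) (b := 1 + (j : Int)) (by omega)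
      push_cast
      rw [show (1 : Int) + ((j : Int) + 1) = (1 + (j : Int)) + 1 by ring, this]
    have htake : S.take (j+1+1) = S.take (j+1) ++ [S[j+1]'(by omega)] := by
      rw [List.take_add_one]
      simp [List.getElem?_eq_getElem (show j+1 < S.length by omega)]
    rw [hsplit, htake, List.foldl_append, List.foldl_append]
    simp only [List.foldl_cons, List.foldl_nil]
    set stA := (PySem.List.pyRange 1 (1 + (j : Int)) 1).foldl (calStepA (d0 :: rest)) ([d0], 0) with hstA
    set stP := (S.take (j+1)).foldl pmStep ([], d0 + 0) with hstP
    have hidx : PySem.List.pyGetD (d0 :: rest) (1 + (j : Int)) 0 = rest[j] := by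
      have : (1 + (j : Int)) = ((j+1 : Nat) : Int) := by push_cast; ring
      rw [this, PySem.List.pyGetD_natCast]
      simp [List.getD, List.getElem?_eq_getElem (show j + 1 < (d0 :: rest).length by simpa using Nat.succ_lt_succ hjlt)]
    have ht : PySem.List.pyGetD (d0 :: rest) stA.2 0 - ((1 + (j : Int)) - stA.2)
        = stP.2 - ((j : Int) + 1) := by rw [h5]; ring
    simp only [calStepA, pmStep]
    rw [ht, hidx, hSget]
    have henum : PySem.List.enumerate (stP.1 ++ [max stP.2 (rest[j] + ((j:Int)+1))]) 0
        = PySem.List.enumerate stP.1 0 ++ [(((j : Nat) + 1 : Int), max stP.2 (rest[j] + ((j:Int)+1)))] := by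
      rw [PySem.List.enumerate_append, h4]
      push_cast
      simp [PySem.List.enumerate_cons, PySem.List.enumerate_nil]
    by_cases hc : rest[j] ≥ stP.2 - ((j : Int) + 1)
    · have hmax : max stP.2 (rest[j] + ((j:Int)+1)) = rest[j] + ((j:Int)+1) :=
        max_eq_right (by omega)
      rw [if_pos hc]
      refine ⟨?_, by omega, by push_cast; omega, by simp [h4], ?_⟩
      · rw [henum, hmax, List.map_append, ← h1]
        simp
      · rw [hmax, hidx]
        ring
    · have hmax : max stP.2 (rest[j] + ((j:Int)+1)) = stP.2 :=
        max_eq_left (by omega)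
      rw [if_neg hc]
      refine ⟨?_, h2, by push_cast; omega, by simp [h4], ?_⟩
      · rw [henum, hmax, List.map_append, ← h1]
        simp
      · rw [hmax, h5]

-- ===== VERDICT (by name: the statement is the Claim_ definition above) =====
theorem cal_left_max_spec : Claim_equal_cal_left_max := by
  intro dp _ hpre
  unfold Spec_cal_left_max
  match dp with
  | [] => exact absurd rfl hpre
  | d0 :: rest =>
    have h := (cal_invariant d0 rest rest.length le_rfl).1
    have hSlen : (((PySem.List.enumerate (d0 :: rest) 0).map (fun p => p.2 + p.1)).length) = rest.length + 1 := by
      simp [PySem.List.length_enumerate]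
    rw [List.take_of_length_le (by omega)] at h
    show ((PySem.List.pyRange 1 (((d0 :: rest).length : Int)) 1).foldl (calStepA (d0 :: rest)) ([d0], 0)).1
        = cal_left_max_alt (d0 :: rest)
    have halt : cal_left_max_alt (d0 :: rest)
        = (PySem.List.enumerate
            ((((PySem.List.enumerate (d0 :: rest) 0).map (fun p => p.2 + p.1)).foldl pmStep ([], d0 + 0)).1) 0).map
            (fun p => p.2 - p.1) := by
      simp only [cal_left_max_alt, PySem.List.enumerate_cons, List.map_cons]
    rw [halt, ← h]
    rw [show (((d0 :: rest).length : Int)) = 1 + (rest.length : Int) by push_cast [List.length_cons]; ring]
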